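-- pv_equiv track=rewrite | github.com/PruthvirajChavan98/MFT-MCP-HTTPX-Agent | backend/scripts/generate_context_docs.py | _summarize_markdown
-- ===== SOURCE A (Python) =====
-- def _first_non_empty_line(text: str) -> str:
--     for raw in text.splitlines():
--         line = raw.strip()
--         if line:
--             return line
--     return ""
--
-- def _summarize_markdown(text: str) -> str:
--     for line in text.splitlines():
--         stripped = line.strip()
--         if stripped.startswith("#"):
--             return stripped.lstrip("#").strip()
--     first = _first_non_empty_line(text)
--     if first:
--         return first[:140]
--     return "Markdown document."
-- ===== SOURCE B (Python) =====
-- def _summarize_markdown(text: str) -> str: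
--     first = None
--     for line in text.splitlines():
--         stripped = line.strip()
--         if stripped.startswith("#"):
--             return stripped.lstrip("#").strip()
--         if stripped and first is None:
--             first = stripped
--     if first is not None:
--         return first[:140]
--     return "Markdown document."
-- ===== Notes on version B (the rewrite author's own statement) =====
-- stated objective: simpler
-- what changed: B replaces A's two separate scans (heading scan plus a helper re-scanning the text for the first non-empty line) with one single pass that returns a heading immediately and remembers the first non-empty line for the fallback.
import Mathlib
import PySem

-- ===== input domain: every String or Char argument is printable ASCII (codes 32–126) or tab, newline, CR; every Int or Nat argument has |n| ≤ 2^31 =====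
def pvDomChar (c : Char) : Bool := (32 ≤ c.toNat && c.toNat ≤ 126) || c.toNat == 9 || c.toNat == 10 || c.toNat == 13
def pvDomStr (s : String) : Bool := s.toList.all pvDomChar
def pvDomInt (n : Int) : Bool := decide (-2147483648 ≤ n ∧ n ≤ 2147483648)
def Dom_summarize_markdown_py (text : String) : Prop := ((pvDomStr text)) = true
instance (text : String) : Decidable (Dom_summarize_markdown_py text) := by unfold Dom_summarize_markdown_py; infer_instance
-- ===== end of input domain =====

-- B folds A's two separate scans (heading scan + first-non-empty-line helper) into one single pass; objective: simpler.

-- ===== PORT A =====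
-- stripped.lstrip("#") ported by hand: drops exactly the leading '#' characters (exact for this one-char set)
def pvLstripHash (s : String) : String := String.ofList (s.toList.dropWhile (· == '#'))

def pvFirstNonEmptyLine : List String → String
  | [] => ""
  | raw :: rest =>
    let line := PySem.Str.strip raw
    if line ≠ "" then line else pvFirstNonEmptyLine rest

def pvHeadLoop : List String → Option String
  | [] => none
  | l :: rest =>
    let stripped := PySem.Str.strip l
    if PySem.Str.startswith stripped "#" then
      some (PySem.Str.strip (pvLstripHash stripped))
    else pvHeadLoop rest

def summarize_markdown_py (text : String) : String :=
  match pvHeadLoop (PySem.Str.splitlines text) with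
  | some h => h
  | none =>
    let first := pvFirstNonEmptyLine (PySem.Str.splitlines text)
    if first ≠ "" then PySem.Str.slice first none (some 140)
    else "Markdown document."

-- ===== PORT B =====
def pvAltLoop : List String → Option String → String
  | [], first =>
    match first with
    | some f => PySem.Str.slice f none (some 140)
    | none => "Markdown document."
  | line :: rest, first =>
    let stripped := PySem.Str.strip line
    if PySem.Str.startswith stripped "#" then
      PySem.Str.strip (pvLstripHash stripped)
    else if stripped ≠ "" ∧ first = none then pvAltLoop rest (some stripped)
    else pvAltLoop rest first

def summarize_markdown_py_alt (text : String) : String :=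
  pvAltLoop (PySem.Str.splitlines text) none

-- ===== PRECONDITION & SPEC =====
def Spec_summarize_markdown_py (text : String) (out : String) : Prop := out = summarize_markdown_py_alt text
instance (text : String) (out : String) : Decidable (Spec_summarize_markdown_py text out) := by unfold Spec_summarize_markdown_py; infer_instance

-- ===== CLAIM (what is proved, stated in full; the proofs are below) =====
def Claim_equal_summarize_markdown_py : Prop := ∀ (text : String), Dom_summarize_markdown_py text → Spec_summarize_markdown_py text (summarize_markdown_py text)

-- ===== LEMMAS AND PROOFS =====
-- once a first non-empty line f is captured, B's loop returns the heading if one remains, else f[:140]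
lemma pvAltLoop_some (lines : List String) (f : String) :
    pvAltLoop lines (some f) =
      (pvHeadLoop lines).getD (PySem.Str.slice f none (some 140)) := by
  induction lines with
  | nil => simp [pvAltLoop, pvHeadLoop]
  | cons l rest ih =>
    simp only [pvAltLoop, pvHeadLoop]
    split_ifs with h1 h2
    · rfl
    · exact absurd h2.2 (by simp)
    · exact ih

lemma pvAltLoop_none (lines : List String) :
    pvAltLoop lines none =
      (pvHeadLoop lines).getD
        (if pvFirstNonEmptyLine lines ≠ "" then
            PySem.Str.slice (pvFirstNonEmptyLine lines) none (some 140)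
          else "Markdown document.") := by
  induction lines with
  | nil => simp [pvAltLoop, pvHeadLoop, pvFirstNonEmptyLine]
  | cons l rest ih =>
    by_cases h1 : PySem.Str.startswith (PySem.Str.strip l) "#" = true
    · simp_all [pvAltLoop, pvHeadLoop, pvFirstNonEmptyLine]
    · by_cases h2 : PySem.Str.strip l = ""
      · simp_all [pvAltLoop, pvHeadLoop, pvFirstNonEmptyLine]
      · simp_all [pvAltLoop, pvHeadLoop, pvFirstNonEmptyLine, pvAltLoop_some]

-- ===== VERDICT (by name: the statement is the Claim_ definition above) =====
theorem summarize_markdown_py_spec : Claim_equal_summarize_markdown_py := by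
  intro text _
  unfold Spec_summarize_markdown_py summarize_markdown_py summarize_markdown_py_alt
  rw [pvAltLoop_none]
  cases h : pvHeadLoop (PySem.Str.splitlines text) <;> simp
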